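-- pv_equiv track=rewrite | github.com/Dymoxz/TetrisAI | old bs/cmdV2.py | GetShapeDimensions
-- ===== SOURCE A (Python) =====
-- def GetShapeDimensions(coords):
--     xList = []
--     yList = []
--     for i in coords:
--         xList.append(i[0])
--         yList.append(i[1])
--     maxX = max(xList)
--     minX = min(xList)
--     maxY = max(yList)
--     minY = min(yList)
--     height = maxY - minY + 1
--     width = maxX - minX + 1
--     yBotList = []
--     for i in coords:
--         if i[1] == maxY:
--             yBotList.append(i)
--
--
--     return width, height, yBotList
-- ===== SOURCE B (Python) =====
-- def GetShapeDimensions(coords):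
--     it = iter(coords)
--     try:
--         x0, y0 = next(it)
--     except StopIteration:
--         raise ValueError("GetShapeDimensions() of empty coords")
--     minX = maxX = x0
--     minY = maxY = y0
--     bottom = [(x0, y0)]
--     for x, y in it:
--         if x < minX:
--             minX = x
--         if x > maxX:
--             maxX = x
--         if y < minY:
--             minY = y
--         if y > maxY:
--             maxY = y
--             bottom = [(x, y)]
--         elif y == maxY:
--             bottom.append((x, y))
--     return maxX - minX + 1, maxY - minY + 1, bottom
-- ===== Notes on version B (the rewrite author's own statement) =====
-- stated objective: alternative
-- what changed: Single pass over coords maintaining running min/max of x and y plus the bottom-row cells (reset on a new max y, append on a tie), instead of building two coordinate lists, taking four max/min passes and a second filtering pass over coords; both raise ValueError on empty coords, which Pre_ excludes.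
import Mathlib
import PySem

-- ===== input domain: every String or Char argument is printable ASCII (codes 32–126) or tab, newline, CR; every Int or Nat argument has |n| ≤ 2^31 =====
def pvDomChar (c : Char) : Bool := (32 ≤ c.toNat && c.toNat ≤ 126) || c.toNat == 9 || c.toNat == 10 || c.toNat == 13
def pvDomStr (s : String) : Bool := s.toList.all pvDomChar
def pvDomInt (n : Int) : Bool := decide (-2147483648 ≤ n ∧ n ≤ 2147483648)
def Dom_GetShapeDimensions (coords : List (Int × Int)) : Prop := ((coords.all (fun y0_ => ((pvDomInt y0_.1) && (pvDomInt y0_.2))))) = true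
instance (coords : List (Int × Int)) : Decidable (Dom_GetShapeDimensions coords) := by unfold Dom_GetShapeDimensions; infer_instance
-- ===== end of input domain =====

-- B replaces A's six passes (build xList/yList, four max/min calls, a filtering pass) by one
-- pass keeping running min/max and the bottom-row cells; same values everywhere A returns.

-- ===== PORT A =====
def GetShapeDimensions (coords : List (Int × Int)) : Int × Int × (List (Int × Int)) :=
  let xList : List Int := coords.foldl (fun acc i => acc ++ [i.1]) []
  let yList : List Int := coords.foldl (fun acc i => acc ++ [i.2]) []
  match PySem.List.max? xList (fun y => y), PySem.List.min? xList (fun y => y),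
        PySem.List.max? yList (fun y => y), PySem.List.min? yList (fun y => y) with
  | some maxX, some minX, some maxY, some minY =>
      let height := maxY - minY + 1
      let width := maxX - minX + 1
      let yBotList := coords.foldl (fun acc i => if i.2 == maxY then acc ++ [i] else acc) []
      (width, height, yBotList)
  | _, _, _, _ => (0, 0, [])  -- unreachable under Pre_: max([]) raises ValueError

-- ===== PORT B =====
def pvBLoop : List (Int × Int) → Int → Int → Int → Int → List (Int × Int) → Int × Int × (List (Int × Int))
  | [], minX, maxX, minY, maxY, bottom => (maxX - minX + 1, maxY - minY + 1, bottom)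
  | (x, y) :: rest, minX, maxX, minY, maxY, bottom =>
      let minX' := if x < minX then x else minX
      let maxX' := if x > maxX then x else maxX
      let minY' := if y < minY then y else minY
      if y > maxY then pvBLoop rest minX' maxX' minY' y [(x, y)]
      else if y == maxY then pvBLoop rest minX' maxX' minY' maxY (bottom ++ [(x, y)])
      else pvBLoop rest minX' maxX' minY' maxY bottom

def GetShapeDimensions_alt (coords : List (Int × Int)) : Int × Int × (List (Int × Int)) :=
  match coords with
  | [] => (0, 0, [])  -- unreachable under Pre_: B raises ValueError on empty coords
  | (x0, y0) :: rest => pvBLoop rest x0 x0 y0 y0 [(x0, y0)]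

-- ===== PRECONDITION & SPEC =====
-- Both A (max of empty list) and B (explicit raise) raise ValueError on coords = [].
def Pre_GetShapeDimensions (coords : List (Int × Int)) : Prop := coords ≠ []
instance (coords : List (Int × Int)) : Decidable (Pre_GetShapeDimensions coords) := by unfold Pre_GetShapeDimensions; infer_instance
def pvWitness_GetShapeDimensions : (List (Int × Int)) := [(0, 0), (1, 0), (1, 1)]

def Spec_GetShapeDimensions (coords : List (Int × Int)) (out : Int × Int × (List (Int × Int))) : Prop := out = GetShapeDimensions_alt coords
instance (coords : List (Int × Int)) (out : Int × Int × (List (Int × Int))) : Decidable (Spec_GetShapeDimensions coords out) := by unfold Spec_GetShapeDimensions; infer_instance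

-- ===== CLAIM (what is proved, stated in full; the proofs are below) =====
def Claim_equal_GetShapeDimensions : Prop := ∀ (coords : List (Int × Int)), Dom_GetShapeDimensions coords → Pre_GetShapeDimensions coords → Spec_GetShapeDimensions coords (GetShapeDimensions coords)

-- ===== LEMMAS AND PROOFS =====

-- The single-pass loop computes the running max/min folds and the bottom row of the whole input:
-- the bottom accumulator survives only if the incoming maxY is already the global max, and the
-- rest contributes its elements whose y equals the global max, in order.
lemma pvBLoop_spec (rest : List (Int × Int)) :
    ∀ (minX maxX minY maxY : Int) (bottom : List (Int × Int)),
      pvBLoop rest minX maxX minY maxY bottom =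
        ((rest.map Prod.fst).foldl max maxX - (rest.map Prod.fst).foldl min minX + 1,
         (rest.map Prod.snd).foldl max maxY - (rest.map Prod.snd).foldl min minY + 1,
         (if maxY = (rest.map Prod.snd).foldl max maxY then bottom else []) ++
           rest.filter (fun p => p.2 == (rest.map Prod.snd).foldl max maxY)) := by
  induction rest with
  | nil => intro minX maxX minY maxY bottom; simp [pvBLoop]
  | cons p t ih =>
    obtain ⟨x, y⟩ := p
    intro minX maxX minY maxY bottom
    have hle : ∀ (a : Int), a ≤ (t.map Prod.snd).foldl max a :=
      fun a => (PySem.List.le_foldl_max (t.map Prod.snd) a).1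
    have e1 : (if x < minX then x else minX) = min minX x := by
      rw [min_def]; split <;> split <;> omega
    have e2 : (if x > maxX then x else maxX) = max maxX x := by
      rw [max_def]; split <;> split <;> omega
    have e3 : (if y < minY then y else minY) = min minY y := by
      rw [min_def]; split <;> split <;> omega
    simp only [pvBLoop, e1, e2, e3, List.map_cons, List.foldl_cons, List.filter_cons]
    by_cases hgt : y > maxY
    · have hmaxy : max maxY y = y := by omega
      rw [if_pos hgt, ih]; simp only [hmaxy]
      have hne : maxY ≠ (t.map Prod.snd).foldl max y := by have := hle y; omega
      rw [if_neg hne]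
      by_cases hy : y = (t.map Prod.snd).foldl max y
      · simp [← hy]
      · simp [hy]
    · rw [if_neg hgt]
      have hmaxy : max maxY y = maxY := by omega
      by_cases heq : y = maxY
      · have hb : (y == maxY) = true := by simp [heq]
        rw [hb, if_pos rfl, ih]; simp only [hmaxy]
        by_cases hM : maxY = (t.map Prod.snd).foldl max maxY
        · simp [← hM, heq]
        · have : (y == (t.map Prod.snd).foldl max maxY) = false := by
            simp [heq]; omega
          simp [hM, this]
      · have hb : (y == maxY) = false := by simp [heq]
        have hyM : (y == (t.map Prod.snd).foldl max maxY) = false := by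
          have := hle maxY; simp; omega
        simp only [hb, hyM, Bool.false_eq_true, if_false, ih, hmaxy]

-- ===== VERDICT (by name: the statement is the Claim_ definition above) =====
theorem GetShapeDimensions_spec : Claim_equal_GetShapeDimensions := by
  intro coords _ hpre
  unfold Spec_GetShapeDimensions
  match coords with
  | [] => exact absurd rfl hpre
  | (x0, y0) :: rest =>
    simp only [GetShapeDimensions, GetShapeDimensions_alt]
    simp only [PySem.List.foldl_append_singleton_eq_map]
    simp only [List.nil_append, List.map_cons,
      PySem.List.max?_id_cons, PySem.List.min?_id_cons]
    simp only [PySem.List.foldl_append_if]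
    rw [pvBLoop_spec]
    by_cases h : y0 = (rest.map Prod.snd).foldl max y0
    · simp [← h]
    · simp [h]
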